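-- pv_equiv track=rewrite | github.com/edenozery/MEM-Rearrange | main_all.py | check_tandem
-- ===== SOURCE A (Python) =====
-- def check_tandem(csb):
--     new_csb = []
--     num_of_tandem_repeats = 0
--     for i in range(len(csb)-1):
--         if csb[i] != csb[i+1]:
--             new_csb.append(csb[i])
--         else:
--             num_of_tandem_repeats += 1
--     new_csb.append(csb[len(csb)-1])
--
--     if num_of_tandem_repeats != 1:
--         return csb
--     return new_csb
-- ===== SOURCE B (Python) =====
-- def check_tandem(csb):
--     # Locate the positions of adjacent duplicates; if there is exactly one,
--     # delete that element by splicing instead of rebuilding the kept elements.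
--     dups = [i for i in range(len(csb) - 1) if csb[i] == csb[i + 1]]
--     if len(dups) != 1:
--         return csb
--     i = dups[0]
--     return csb[:i] + csb[i + 1:]
-- ===== Notes on version B (the rewrite author's own statement) =====
-- stated objective: alternative
-- what changed: B first collects the index positions of adjacent duplicates, and when exactly one exists deletes that element by slicing (csb[:i] + csb[i+1:]) instead of rebuilding the output element-by-element with a counter; B returns [] on empty input where A raises.
-- outside the precondition, e.g. on check_tandem([]): A raises IndexError, B returns []
import Mathlib
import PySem

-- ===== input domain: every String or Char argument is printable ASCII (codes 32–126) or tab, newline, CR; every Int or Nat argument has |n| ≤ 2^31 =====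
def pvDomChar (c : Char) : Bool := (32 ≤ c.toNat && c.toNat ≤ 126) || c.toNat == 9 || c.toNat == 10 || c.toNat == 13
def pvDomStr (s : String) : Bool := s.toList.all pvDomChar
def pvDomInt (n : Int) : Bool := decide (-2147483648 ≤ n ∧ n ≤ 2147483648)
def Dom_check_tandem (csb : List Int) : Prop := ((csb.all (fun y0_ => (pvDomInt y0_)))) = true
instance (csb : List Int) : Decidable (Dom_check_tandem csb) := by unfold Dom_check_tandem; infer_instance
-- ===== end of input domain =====

-- B collects the index positions of adjacent duplicates and, when exactly one exists,
-- deletes that element by slicing instead of rebuilding the output with a counter;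
-- on empty input A raises IndexError, B returns [].

-- ===== PORT A =====
def check_tandem (csb : List Int) : List Int :=
  let st := (PySem.List.pyRange 0 ((csb.length : Int) - 1) 1).foldl
    (fun (st : List Int × Int) i =>
      if PySem.List.pyGetD csb i 0 != PySem.List.pyGetD csb (i + 1) 0
      then (st.1 ++ [PySem.List.pyGetD csb i 0], st.2)
      else (st.1, st.2 + 1)) ([], 0)
  let new_csb := st.1 ++ [PySem.List.pyGetD csb ((csb.length : Int) - 1) 0]
  if st.2 ≠ 1 then csb else new_csb

-- ===== PORT B =====
def check_tandem_alt (csb : List Int) : List Int :=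
  let dups := (PySem.List.pyRange 0 ((csb.length : Int) - 1) 1).filter
    (fun i => PySem.List.pyGetD csb i 0 == PySem.List.pyGetD csb (i + 1) 0)
  if dups.length ≠ 1 then csb
  else
    let i := PySem.List.pyGetD dups 0 0
    PySem.List.slice csb none (some i) ++ PySem.List.slice csb (some (i + 1)) none

-- ===== PRECONDITION & SPEC =====
-- Pre_ excludes only the empty list, on which A raises IndexError at csb[len(csb)-1].
def Pre_check_tandem (csb : List Int) : Prop := csb ≠ []
instance (csb : List Int) : Decidable (Pre_check_tandem csb) := by unfold Pre_check_tandem; infer_instance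
def pvWitness_check_tandem : List Int := [1, 1, 2]

def Spec_check_tandem (csb : List Int) (out : List Int) : Prop := out = check_tandem_alt csb
instance (csb : List Int) (out : List Int) : Decidable (Spec_check_tandem csb out) := by unfold Spec_check_tandem; infer_instance

-- ===== CLAIM (what is proved, stated in full; the proofs are below) =====
def Claim_equal_check_tandem : Prop := ∀ (csb : List Int), Dom_check_tandem csb → Pre_check_tandem csb → Spec_check_tandem csb (check_tandem csb)

-- ===== LEMMAS AND PROOFS =====

-- indices of adjacent-duplicate pairs in a pair list
def eqIdxs : List (Int × Int) → List Nat
  | [] => []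
  | p :: rest => (if p.1 = p.2 then [0] else []) ++ (eqIdxs rest).map (· + 1)

theorem length_eqIdxs (ps : List (Int × Int)) :
    (eqIdxs ps).length = ps.countP (fun p => p.1 == p.2) := by
  induction ps with
  | nil => simp [eqIdxs]
  | cons p rest ih =>
    by_cases h : p.1 = p.2 <;> simp [eqIdxs, h, ih]

-- A's loop over range(len-1) computed on the pair list
theorem loop_eq (csb : List Int) (h : csb ≠ []) :
    (PySem.List.pyRange 0 ((csb.length : Int) - 1) 1).foldl
      (fun (st : List Int × Int) i =>
        if PySem.List.pyGetD csb i 0 != PySem.List.pyGetD csb (i + 1) 0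
        then (st.1 ++ [PySem.List.pyGetD csb i 0], st.2)
        else (st.1, st.2 + 1)) (([], 0) : List Int × Int)
    = (((csb.zip csb.tail).filter (fun p => p.1 != p.2)).map Prod.fst,
       ((csb.zip csb.tail).countP (fun p => p.1 == p.2) : Int)) := by
  set ps := csb.zip csb.tail with hps
  have hlen : ps.length = csb.length - 1 := by
    simp [hps, List.length_zip]
  have hlen' : ((csb.length : Int) - 1) = (ps.length : Int) := by
    have : 1 ≤ csb.length := List.length_pos_iff.mpr h
    omega
  rw [hlen']
  have hcongr :
      (PySem.List.pyRange 0 (ps.length : Int) 1).foldl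
        (fun (st : List Int × Int) i =>
          if PySem.List.pyGetD csb i 0 != PySem.List.pyGetD csb (i + 1) 0
          then (st.1 ++ [PySem.List.pyGetD csb i 0], st.2)
          else (st.1, st.2 + 1)) (([], 0) : List Int × Int)
      = (PySem.List.pyRange 0 (ps.length : Int) 1).foldl
        (fun (st : List Int × Int) i =>
          if (PySem.List.pyGetD ps i (0, 0)).1 != (PySem.List.pyGetD ps i (0, 0)).2
          then (st.1 ++ [(PySem.List.pyGetD ps i (0, 0)).1], st.2)
          else (st.1, st.2 + 1)) (([], 0) : List Int × Int) := by
    apply PySem.List.foldl_congr_mem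
    intro acc i hi
    have hi' := (PySem.List.mem_pyRange_one).1 hi
    obtain ⟨hi0, hilt⟩ := hi'
    have hk : i.toNat < ps.length := by omega
    have hk1 : i.toNat + 1 < csb.length := by omega
    have hk0 : i.toNat < csb.length := by omega
    have e1 : PySem.List.pyGetD csb i 0 = csb[i.toNat] :=
      PySem.List.pyGetD_eq_getElem (xs := csb) (i := i) (d := 0) hi0 (by omega)
    have e2 : PySem.List.pyGetD csb (i + 1) 0 = csb[i.toNat + 1] := by
      have := PySem.List.pyGetD_eq_getElem (xs := csb) (i := i + 1) (d := 0)
        (by omega) (by omega)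
      simpa [show (i + 1).toNat = i.toNat + 1 by omega] using this
    have e3 : PySem.List.pyGetD ps i (0, 0) = ps[i.toNat] :=
      PySem.List.pyGetD_eq_getElem (xs := ps) (i := i) (d := (0, 0)) hi0 (by omega)
    have e4 : ps[i.toNat] = (csb[i.toNat], csb.tail[i.toNat]'(by
        simp [List.length_tail]; omega)) := by
      simp [hps, List.getElem_zip]
    have e5 : csb.tail[i.toNat]'(by simp [List.length_tail]; omega) = csb[i.toNat + 1] := by
      rw [List.getElem_tail]
    rw [e1, e2, e3, e4, e5]
  rw [hcongr]
  rw [PySem.List.foldl_pyRange_zero_pyGetD' ps ((0 : Int), (0 : Int))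
      (fun (st : List Int × Int) (p : Int × Int) =>
        if p.1 != p.2 then (st.1 ++ [p.1], st.2) else (st.1, st.2 + 1)) (([], 0) : List Int × Int)]
  have hsplit :
      ps.foldl (fun (st : List Int × Int) (p : Int × Int) =>
        if p.1 != p.2 then (st.1 ++ [p.1], st.2) else (st.1, st.2 + 1)) (([], 0) : List Int × Int)
      = ps.foldl (fun (st : List Int × Int) (p : Int × Int) =>
        ((if p.1 != p.2 then st.1 ++ [p.1] else st.1),
         (if p.1 == p.2 then st.2 + 1 else st.2))) (([], 0) : List Int × Int) := by
    apply PySem.List.foldl_congr_mem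
    intro acc p _
    by_cases hpq : p.1 = p.2 <;> simp [hpq]
  rw [hsplit]
  rw [PySem.List.foldl_prod_mk
      (f := fun (acc : List Int) (p : Int × Int) => if p.1 != p.2 then acc ++ [p.1] else acc)
      (g := fun (acc : Int) (p : Int × Int) => if p.1 == p.2 then acc + 1 else acc)]
  rw [PySem.List.foldl_append_if (p := fun p : Int × Int => p.1 != p.2) (f := Prod.fst)]
  rw [PySem.List.foldl_if_add_one (p := fun p : Int × Int => p.1 == p.2)]
  simp

-- the filter over range(len-1) computing B's dups, on the pair list
theorem range_filter_eq_eqIdxs (ps : List (Int × Int)) :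
    (List.range ps.length).filter
      (fun k => (ps.getD k (0, 0)).1 == (ps.getD k (0, 0)).2) = eqIdxs ps := by
  induction ps with
  | nil => simp [eqIdxs]
  | cons p rest ih =>
    rw [List.length_cons, List.range_succ_eq_map]
    rw [List.filter_cons]
    by_cases h : p.1 = p.2
    · simp only [eqIdxs, h, if_pos]
      rw [List.filter_map]
      simp only [List.getD_cons_succ, Function.comp_def]
      rw [ih]
      simp [h]
    · simp only [eqIdxs, h]
      rw [List.filter_map]
      simp only [List.getD_cons_succ, Function.comp_def]
      rw [ih]
      simp [h]

-- B's dups list equals eqIdxs of the pair list (cast to Int)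
theorem dups_eq (csb : List Int) (h : csb ≠ []) :
    (PySem.List.pyRange 0 ((csb.length : Int) - 1) 1).filter
      (fun i => PySem.List.pyGetD csb i 0 == PySem.List.pyGetD csb (i + 1) 0)
    = (eqIdxs (csb.zip csb.tail)).map (fun n : Nat => (n : Int)) := by
  set ps := csb.zip csb.tail with hps
  have hlen : ps.length = csb.length - 1 := by simp [hps, List.length_zip]
  have hpos : 1 ≤ csb.length := List.length_pos_iff.mpr h
  have hm : ((csb.length : Int) - 1) = ((ps.length : Nat) : Int) := by omega
  rw [hm, PySem.List.pyRange_zero_natCast, List.filter_map]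
  rw [← range_filter_eq_eqIdxs ps]
  apply congrArg
  apply List.filter_congr
  intro k hk
  have hk' : k < ps.length := List.mem_range.mp hk
  have hk1 : k + 1 < csb.length := by omega
  have hk0 : k < csb.length := by omega
  have e1 : PySem.List.pyGetD csb ((k : Nat) : Int) 0 = csb[k] := by
    rw [PySem.List.pyGetD_natCast, List.getD_eq_getElem _ _ hk0]
  have e2 : PySem.List.pyGetD csb (((k : Nat) : Int) + 1) 0 = csb[k + 1] := by
    have : ((k : Nat) : Int) + 1 = (((k + 1 : Nat)) : Int) := by omega
    rw [this, PySem.List.pyGetD_natCast, List.getD_eq_getElem _ _ hk1]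
  have e3 : ps.getD k (0, 0) = (csb[k], csb[k + 1]) := by
    rw [List.getD_eq_getElem _ _ hk']
    have : ps[k] = (csb[k], csb.tail[k]'(by simp [List.length_tail]; omega)) := by
      simp [hps, List.getElem_zip]
    rw [this, List.getElem_tail]
  simp only [Function.comp_def, e1, e2, e3]

-- when no adjacent duplicate exists, the kept firsts are dropLast
theorem no_dup_keeps_all (x : Int) (t : List Int)
    (h : eqIdxs ((x :: t).zip t) = []) :
    (((x :: t).zip t).filter (fun p => p.1 != p.2)).map Prod.fst = (x :: t).dropLast := by
  induction t generalizing x with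
  | nil => simp
  | cons y u ih =>
    simp only [List.zip_cons_cons, eqIdxs, List.append_eq_nil_iff, List.map_eq_nil_iff] at h
    obtain ⟨h1, h2⟩ := h
    have hxy : x ≠ y := by by_contra he; simp [he] at h1
    rw [List.zip_cons_cons, List.filter_cons_of_pos (by simp [hxy]), List.map_cons, ih y h2]
    rfl

-- with exactly one adjacent duplicate at index i, A's rebuilt list is the splice
theorem one_dup_splice (t : List Int) (x : Int) (i : Nat)
    (h : eqIdxs ((x :: t).zip t) = [i]) :
    (((x :: t).zip t).filter (fun p => p.1 != p.2)).map Prod.fst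
      ++ [(x :: t).getLast (by simp)]
    = (x :: t).take i ++ (x :: t).drop (i + 1) := by
  induction t generalizing x i with
  | nil => simp [eqIdxs] at h
  | cons y u ih =>
    simp only [List.zip_cons_cons, eqIdxs] at h
    by_cases hxy : x = y
    · simp only [hxy] at h
      have hi0 : i = 0 := by
        have := congrArg (fun l => l.headD 7) h
        simpa using this.symm
      have hrest : eqIdxs ((y :: u).zip u) = [] := by
        subst hi0
        cases hE : eqIdxs ((y :: u).zip u) with
        | nil => rfl
        | cons a l => rw [hE] at h; simp at h
      subst hi0
      rw [List.zip_cons_cons, List.filter_cons_of_neg (by simp [hxy])]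
      have hlast : (x :: y :: u).getLast (by simp) = (y :: u).getLast (by simp) := by
        simp [List.getLast_cons]
      rw [hlast, no_dup_keeps_all y u hrest]
      simp [List.dropLast_append_getLast]
    · simp only [hxy] at h
      obtain ⟨j, hj, hij⟩ : ∃ j, eqIdxs ((y :: u).zip u) = [j] ∧ i = j + 1 := by
        cases hE : eqIdxs ((y :: u).zip u) with
        | nil => rw [hE] at h; simp at h
        | cons a l =>
          rw [hE] at h
          cases l with
          | nil => simp at h; exact ⟨a, rfl, h.symm⟩
          | cons b m => simp at h
      subst hij
      rw [List.zip_cons_cons, List.filter_cons_of_pos (by simp [hxy])]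
      have hlast : (x :: y :: u).getLast (by simp) = (y :: u).getLast (by simp) := by
        simp [List.getLast_cons]
      rw [List.map_cons, List.cons_append, hlast, ih y j hj]
      rfl

-- ===== VERDICT (by name: the statements are the Claim_ definitions above) =====
theorem check_tandem_spec : Claim_equal_check_tandem := by
  intro csb _ hpre
  unfold Spec_check_tandem check_tandem check_tandem_alt
  have h : csb ≠ [] := hpre
  rw [loop_eq csb h, dups_eq csb h]
  by_cases hc1 : (csb.zip csb.tail).countP (fun p => p.1 == p.2) = 1
  · obtain ⟨i, hi⟩ : ∃ i, eqIdxs (csb.zip csb.tail) = [i] := by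
      have hl : (eqIdxs (csb.zip csb.tail)).length = 1 := by rw [length_eqIdxs, hc1]
      cases hE : eqIdxs (csb.zip csb.tail) with
      | nil => rw [hE] at hl; simp at hl
      | cons a l =>
        rw [hE] at hl
        cases l with
        | nil => exact ⟨a, rfl⟩
        | cons b m => simp at hl
    rw [hi, hc1]
    simp only [List.map_cons, List.map_nil]
    rw [if_neg (by norm_num : ¬ (((1 : Nat) : Int) ≠ 1))]
    rw [if_neg (by simp : ¬ (([((i : Nat) : Int)] : List Int).length ≠ 1))]
    have hget : PySem.List.pyGetD ([((i : Nat) : Int)] : List Int) 0 0 = ((i : Nat) : Int) := by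
      simp [PySem.List.pyGetD, PySem.List.pyGet?, PySem.List.pyIdx?]
    rw [hget]
    have hcast : (((i : Nat) : Int)) + 1 = (((i + 1 : Nat)) : Int) := by push_cast; ring
    rw [hcast, PySem.List.slice_to_natCast, PySem.List.slice_from_natCast]
    have hlast : PySem.List.pyGetD csb ((csb.length : Int) - 1) 0 = csb.getLast h := by
      have hlen : 1 ≤ csb.length := List.length_pos_iff.mpr h
      have : ((csb.length : Int) - 1) = ((csb.length - 1 : Nat) : Int) := by omega
      rw [this, PySem.List.pyGetD_natCast]
      rw [List.getD_eq_getElem _ _ (by omega)]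
      exact (List.getLast_eq_getElem h).symm
    rw [hlast]
    obtain ⟨x, t, hxt⟩ : ∃ x t, csb = x :: t := by
      cases csb with
      | nil => exact absurd rfl h
      | cons a l => exact ⟨a, l, rfl⟩
    subst hxt
    have htail : (x :: t).tail = t := rfl
    rw [htail] at hi ⊢
    exact one_dup_splice t x i hi
  · rw [if_pos (by omega : ((csb.zip csb.tail).countP (fun p => p.1 == p.2) : Int) ≠ 1)]
    rw [if_pos (by simp [length_eqIdxs, hc1] : ((eqIdxs (csb.zip csb.tail)).map (fun n : Nat => (n : Int))).length ≠ 1)]
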